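-- pv_equiv track=rewrite | github.com/minnnisu/baekjoon | step_by_step/05_function/No_1065.py | get_hansu
-- ===== SOURCE A (Python) =====
-- def get_hansu(n): #한수의 개수 반환
--     count = 99
--     if(n < 100):
--         return n
--
--     for i in range(100, n+1):
--         num_0 = i%10
--         num_1 = (i // 10)%10
--         num_2 = i // 100
--
--         if((num_0 - num_1) == (num_1-num_2)):
--             count+=1
--
--     return count
-- ===== SOURCE B (Python) =====
-- # Candidates computed once: no i >= 1900 can satisfy the test, because
-- # i//100 >= 19 while i%10 + i//100 must equal 2*((i//10)%10) <= 18.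
-- HANSU_UP_TO_1899 = [i for i in range(100, 1900)
--                     if i % 10 + i // 100 == 2 * ((i // 10) % 10)]
--
-- def get_hansu(n):
--     if n < 100:
--         return n
--     return 99 + sum(1 for x in HANSU_UP_TO_1899 if x <= n)
-- ===== Notes on version B (the rewrite author's own statement) =====
-- stated objective: faster
-- what changed: Replaces the O(n) scan of 100..n by a precomputed fixed table of all qualifying numbers (none exist above 1899, since i//100+i%10 <= 18 is required) and counts the table entries <= n.
import Mathlib
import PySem

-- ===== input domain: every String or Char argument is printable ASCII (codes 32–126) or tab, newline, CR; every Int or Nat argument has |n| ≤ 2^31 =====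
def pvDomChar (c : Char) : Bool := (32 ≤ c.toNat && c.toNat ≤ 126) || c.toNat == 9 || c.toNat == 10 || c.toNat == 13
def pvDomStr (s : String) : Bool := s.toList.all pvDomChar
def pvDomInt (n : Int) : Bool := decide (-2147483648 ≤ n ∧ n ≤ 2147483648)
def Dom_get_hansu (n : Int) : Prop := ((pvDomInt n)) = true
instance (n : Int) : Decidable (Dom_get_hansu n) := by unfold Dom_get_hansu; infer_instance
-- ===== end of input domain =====

-- B replaces A's O(n) scan by a fixed precomputed table of qualifying numbers (none exist above 1899), counting table entries ≤ n: asymptotically faster, same return value.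

-- ===== PORT A =====
def get_hansu (n : Int) : Int :=
  let count : Int := 99
  if n < 100 then n
  else
    (PySem.List.pyRange 100 (n + 1) 1).foldl (fun count i =>
      let num_0 := PySem.Int.mod i 10
      let num_1 := PySem.Int.mod (PySem.Int.floordiv i 10) 10
      let num_2 := PySem.Int.floordiv i 100
      if num_0 - num_1 == num_1 - num_2 then count + 1 else count) count

-- ===== PORT B =====
def hansuUpTo1899 : List Int :=
  (PySem.List.pyRange 100 1900 1).filter (fun i =>
    PySem.Int.mod i 10 + PySem.Int.floordiv i 100 == 2 * PySem.Int.mod (PySem.Int.floordiv i 10) 10)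

def get_hansu_alt (n : Int) : Int :=
  if n < 100 then n
  else 99 + ((hansuUpTo1899.filter (fun x => x ≤ n)).length : Int)

-- ===== PRECONDITION & SPEC =====
def Spec_get_hansu (n : Int) (out : Int) : Prop := out = get_hansu_alt n
instance (n : Int) (out : Int) : Decidable (Spec_get_hansu n out) := by unfold Spec_get_hansu; infer_instance

-- ===== CLAIM (what is proved, stated in full; the proofs are below) =====
def Claim_equal_get_hansu : Prop := ∀ (n : Int), Dom_get_hansu n → Spec_get_hansu n (get_hansu n)

-- ===== LEMMAS AND PROOFS =====

-- the shared digit condition, as a Bool predicate on Int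
def hansuCond (i : Int) : Bool :=
  PySem.Int.mod i 10 - PySem.Int.mod (PySem.Int.floordiv i 10) 10
    == PySem.Int.mod (PySem.Int.floordiv i 10) 10 - PySem.Int.floordiv i 100

lemma condB_eq_condA (i : Int) :
    (PySem.Int.mod i 10 + PySem.Int.floordiv i 100
      == 2 * PySem.Int.mod (PySem.Int.floordiv i 10) 10) = hansuCond i := by
  unfold hansuCond
  rw [Bool.eq_iff_iff]
  simp only [beq_iff_eq]
  omega

lemma count_fold (l : List Int) (acc : Int) :
    l.foldl (fun c i => if hansuCond i then c + 1 else c) acc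
      = acc + ((l.filter hansuCond).length : Int) := by
  induction l generalizing acc with
  | nil => simp
  | cons x t ih =>
    simp only [List.foldl_cons, List.filter_cons]
    by_cases h : hansuCond x
    · simp [h, ih, add_comm]
      omega
    · simp [h, ih]

lemma cond_false_of_big {i : Int} (h : 1900 ≤ i) : hansuCond i = false := by
  unfold hansuCond
  rw [PySem.Int.mod_eq_emod_of_pos (a := i) (by norm_num),
      PySem.Int.mod_eq_emod_of_pos (a := PySem.Int.floordiv i 10) (by norm_num),
      PySem.Int.floordiv_eq_ediv_of_pos (a := i) (b := 10) (by norm_num),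
      PySem.Int.floordiv_eq_ediv_of_pos (a := i) (b := 100) (by norm_num)]
  simp only [beq_eq_false_iff_ne, ne_eq]
  intro heq
  have h0 : 0 ≤ i % 10 := Int.emod_nonneg _ (by norm_num)
  have h1 : i % 10 < 10 := Int.emod_lt_of_pos _ (by norm_num)
  have h2 : 0 ≤ (i / 10) % 10 := Int.emod_nonneg _ (by norm_num)
  have h3 : (i / 10) % 10 < 10 := Int.emod_lt_of_pos _ (by norm_num)
  have h4 : 19 ≤ i / 100 := by omega
  omega

lemma filter_big_nil (a b : Int) (ha : 1900 ≤ a) :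
    (PySem.List.pyRange a b 1).filter hansuCond = [] := by
  rw [List.filter_eq_nil_iff]
  intro x hx
  rw [PySem.List.mem_pyRange_one] at hx
  simp [cond_false_of_big (le_trans ha hx.1)]

-- A's value for n ≥ 100 as 99 + number of qualifying i in [100, n]
set_option maxRecDepth 4000 in
lemma A_eq (n : Int) (hn : 100 ≤ n) :
    get_hansu n = 99 + (((PySem.List.pyRange 100 (n + 1) 1).filter hansuCond).length : Int) := by
  unfold get_hansu
  rw [if_neg (by omega)]
  exact count_fold _ 99

lemma table_eq : hansuUpTo1899 = (PySem.List.pyRange 100 1900 1).filter hansuCond :=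
  List.filter_congr (fun x _ => condB_eq_condA x)

lemma B_eq (n : Int) (hn : 100 ≤ n) :
    get_hansu_alt n
      = 99 + ((((PySem.List.pyRange 100 1900 1).filter hansuCond).filter (fun x => x ≤ n)).length : Int) := by
  unfold get_hansu_alt
  rw [table_eq, if_neg (by omega)]

lemma filters_eq (n : Int) (hn : 100 ≤ n) :
    ((PySem.List.pyRange 100 1900 1).filter hansuCond).filter (fun x => x ≤ n)
      = (PySem.List.pyRange 100 (n + 1) 1).filter hansuCond := by
  by_cases hbig : 1900 ≤ n + 1
  · -- all table entries are ≤ n; the part of A's range above 1899 contributes nothing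
    rw [PySem.List.pyRange_one_append 100 1900 (n + 1) (by norm_num) hbig,
        List.filter_append, filter_big_nil 1900 (n + 1) le_rfl, List.append_nil]
    rw [List.filter_eq_self]
    intro x hx
    have := List.mem_filter.mp hx
    rw [PySem.List.mem_pyRange_one] at this
    simp only [decide_eq_true_eq]
    omega
  · -- n < 1899: split the table's range at n + 1; filter (≤ n) keeps exactly the first part
    rw [PySem.List.pyRange_one_append 100 (n + 1) 1900 (by omega) (by omega),
        List.filter_append, List.filter_append]
    have h1 : (((PySem.List.pyRange 100 (n + 1) 1).filter hansuCond).filter (fun x => x ≤ n))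
        = (PySem.List.pyRange 100 (n + 1) 1).filter hansuCond := by
      rw [List.filter_eq_self]
      intro x hx
      have := List.mem_filter.mp hx
      rw [PySem.List.mem_pyRange_one] at this
      simp only [decide_eq_true_eq]
      omega
    have h2 : (((PySem.List.pyRange (n + 1) 1900 1).filter hansuCond).filter (fun x => x ≤ n))
        = [] := by
      rw [List.filter_eq_nil_iff]
      intro x hx
      have := List.mem_filter.mp hx
      rw [PySem.List.mem_pyRange_one] at this
      simp only [decide_eq_true_eq]
      omega
    rw [h1, h2, List.append_nil]

lemma main_eq (n : Int) (hn : 100 ≤ n) : get_hansu n = get_hansu_alt n := by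
  rw [A_eq n hn, B_eq n hn, filters_eq n hn]

-- ===== VERDICT (by name: the statement is the Claim_ definition above) =====
theorem get_hansu_spec : Claim_equal_get_hansu := by
  intro n _
  unfold Spec_get_hansu
  by_cases hn : n < 100
  · unfold get_hansu get_hansu_alt
    simp [hn]
  · exact main_eq n (by omega)
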